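-- pv_equiv track=rewrite | github.com/jfgoodall/advent-of-code | 2024/py/day07.py | part1
-- ===== SOURCE A (Python) =====
-- import itertools
--
-- def part1(data):
--     answer = 0
--     for total, operands in data:
--         ops_possibilities = itertools.product('+*', repeat=len(operands)-1)
--         for ops_combo in ops_possibilities:
--             res = operands[0]
--             for operator, operand in zip(ops_combo, operands[1:]):
--                 match operator:
--                     case '+':
--                         res += operand
--                     case '*':
--                         res *= operand
--                 if res > total: break
--             if res == total:
--                 answer += total
--                 break
--
--     return answer
-- ===== SOURCE B (Python) =====
-- def part1(data):
--     answer = 0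
--     for total, operands in data:
--         vals = {operands[0]}
--         for x in operands[1:]:
--             vals = {r for v in vals for r in (v + x, v * x) if r <= total}
--         if total in vals:
--             answer += total
--     return answer
-- ===== Notes on version B (the rewrite author's own statement) =====
-- stated objective: faster
-- what changed: B replaces A's enumeration of all 2^(n-1) operator combinations per equation by a single forward pass keeping the deduplicated set of reachable values pruned at > total.
-- outside the precondition, e.g. on part1([(5, [])]): A raises ValueError, B raises IndexError
import Mathlib
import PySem

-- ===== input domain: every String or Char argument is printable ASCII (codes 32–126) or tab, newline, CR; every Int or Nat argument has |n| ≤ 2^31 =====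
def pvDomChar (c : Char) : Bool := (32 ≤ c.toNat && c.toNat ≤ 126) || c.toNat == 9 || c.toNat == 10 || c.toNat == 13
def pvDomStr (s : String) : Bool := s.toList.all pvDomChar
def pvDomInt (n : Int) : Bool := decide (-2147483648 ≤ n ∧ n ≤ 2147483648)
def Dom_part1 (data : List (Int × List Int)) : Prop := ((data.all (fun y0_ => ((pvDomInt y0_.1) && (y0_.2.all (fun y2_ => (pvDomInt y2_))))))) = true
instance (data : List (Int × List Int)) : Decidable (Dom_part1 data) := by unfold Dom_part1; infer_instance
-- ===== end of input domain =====

-- B replaces A's enumeration of all 2^(n-1) operator combos by a forward reachable-value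
-- set DP (deduplicated, pruned at > total); measurably faster on larger operand lists.

-- ===== PORT A =====
-- itertools.product('+*', repeat=k): all length-k sequences over ['+','*']
def pvCombos : Nat → List (List Char)
  | 0 => [[]]
  | k+1 => ['+', '*'].flatMap (fun c => (pvCombos k).map (fun ops => c :: ops))

-- the inner 'for operator, operand in zip(...)' loop with its 'if res > total: break'
def pvRunA (total res : Int) : List Char → List Int → Int
  | op :: ops, y :: ys =>
      let r := if op = '+' then res + y else res * y
      if r > total then r else pvRunA total r ops ys
  | _, _ => res

def part1 (data : List (Int × List Int)) : Int :=
  data.foldl (fun answer p =>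
    match p.2 with
    | [] => answer  -- unreachable under Pre_part1 (Python A raises ValueError here)
    | x :: rest =>
      if (pvCombos rest.length).any (fun combo => pvRunA p.1 x combo rest == p.1) then
        answer + p.1
      else answer) 0

-- ===== PORT B =====
-- vals = {r for v in vals for r in (v + x, v * x) if r <= total}
def pvStep (total x : Int) (vals : PySem.Set Int) : PySem.Set Int :=
  PySem.Set.ofList ((vals.flatMap (fun v => [v + x, v * x])).filter (fun r => decide (r ≤ total)))

-- the 'for x in operands[1:]' loop
def pvReach (total : Int) (vals : PySem.Set Int) : List Int → PySem.Set Int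
  | [] => vals
  | x :: rest => pvReach total (pvStep total x vals) rest

def part1_alt (data : List (Int × List Int)) : Int :=
  data.foldl (fun answer p =>
    match p.2 with
    | [] => answer  -- unreachable under Pre_part1 (Python B raises IndexError here)
    | x :: rest =>
      if (pvReach p.1 (PySem.Set.ofList [x]) rest).contains p.1 then
        answer + p.1
      else answer) 0

-- ===== PRECONDITION & SPEC =====
-- Pre_ excludes pairs with an empty operand list, on which Python A raises ValueError
-- (itertools.product with repeat=-1) and Python B raises IndexError (operands[0]).
def Pre_part1 (data : List (Int × List Int)) : Prop := ∀ p ∈ data, p.2 ≠ []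
instance (data : List (Int × List Int)) : Decidable (Pre_part1 data) := by unfold Pre_part1; infer_instance

def pvWitness_part1 : (List (Int × List Int)) := [(5, [2, 3]), (7, [2, 3])]

def Spec_part1 (data : List (Int × List Int)) (out : Int) : Prop := out = part1_alt data
instance (data : List (Int × List Int)) (out : Int) : Decidable (Spec_part1 data out) := by unfold Spec_part1; infer_instance

-- ===== CLAIM (what is proved, stated in full; the proofs are below) =====
def Claim_equal_part1 : Prop := ∀ (data : List (Int × List Int)), Dom_part1 data → Pre_part1 data → Spec_part1 data (part1 data)

-- ===== LEMMAS AND PROOFS =====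

-- unfoldings of A's inner loop for the two operators
lemma pvRunA_plus (t res y : Int) (ops : List Char) (ys : List Int) :
    pvRunA t res ('+' :: ops) (y :: ys)
      = if res + y > t then res + y else pvRunA t (res + y) ops ys := by
  simp [pvRunA]

lemma pvRunA_star (t res y : Int) (ops : List Char) (ys : List Int) :
    pvRunA t res ('*' :: ops) (y :: ys)
      = if res * y > t then res * y else pvRunA t (res * y) ops ys := by
  simp [pvRunA]

-- membership in the DP set = existence of an operator combo that A's inner loop runs to t
lemma mem_pvReach (t : Int) : ∀ (rest : List Int) (S : List Int),
    t ∈ pvReach t S rest ↔ ∃ v ∈ S, ∃ c ∈ pvCombos rest.length, pvRunA t v c rest = t := by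
  intro rest
  induction rest with
  | nil =>
      intro S
      simp [pvReach, pvCombos, pvRunA]
  | cons x rest ih =>
      intro S
      show t ∈ pvReach t (pvStep t x S) rest ↔ _
      rw [ih]
      constructor
      · rintro ⟨w, hw, c, hc, hrun⟩
        simp only [pvStep, PySem.Set.mem_ofList, List.mem_filter, List.mem_flatMap,
          List.mem_cons, decide_eq_true_eq] at hw
        obtain ⟨⟨v, hv, hw'⟩, hle⟩ := hw
        have hw2 : w = v + x ∨ w = v * x := by
          rcases hw' with h | h | h
          · exact Or.inl h
          · exact Or.inr h
          · simp at h
        rcases hw2 with he | he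
        · subst he
          refine ⟨v, hv, '+' :: c, ?_, ?_⟩
          · simp only [List.length_cons, pvCombos, List.mem_flatMap, List.mem_map]
            exact ⟨'+', by simp, c, hc, rfl⟩
          · rw [pvRunA_plus, if_neg (by omega)]
            exact hrun
        · subst he
          refine ⟨v, hv, '*' :: c, ?_, ?_⟩
          · simp only [List.length_cons, pvCombos, List.mem_flatMap, List.mem_map]
            exact ⟨'*', by simp, c, hc, rfl⟩
          · rw [pvRunA_star, if_neg (by omega)]
            exact hrun
      · rintro ⟨v, hv, c, hc, hrun⟩
        simp only [List.length_cons, pvCombos, List.mem_flatMap, List.mem_cons,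
          List.mem_map] at hc
        obtain ⟨op, hop, c', hc', rfl⟩ := hc
        have hmem : ∀ w, (w = v + x ∨ w = v * x) → w ≤ t → w ∈ pvStep t x S := by
          intro w hw hle
          simp only [pvStep, PySem.Set.mem_ofList, List.mem_filter, List.mem_flatMap,
            List.mem_cons, decide_eq_true_eq]
          exact ⟨⟨v, hv, by tauto⟩, hle⟩
        rcases hop with h | h | h
        · subst h
          rw [pvRunA_plus] at hrun
          by_cases hgt : v + x > t
          · rw [if_pos hgt] at hrun; omega
          · rw [if_neg hgt] at hrun
            exact ⟨v + x, hmem _ (Or.inl rfl) (by omega), c', hc', hrun⟩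
        · subst h
          rw [pvRunA_star] at hrun
          by_cases hgt : v * x > t
          · rw [if_pos hgt] at hrun; omega
          · rw [if_neg hgt] at hrun
            exact ⟨v * x, hmem _ (Or.inr rfl) (by omega), c', hc', hrun⟩
        · simp at h

-- the two per-equation success tests coincide
lemma cond_eq (t x : Int) (rest : List Int) :
    (pvReach t (PySem.Set.ofList [x]) rest).contains t
      = (pvCombos rest.length).any (fun combo => pvRunA t x combo rest == t) := by
  rw [Bool.eq_iff_iff]
  rw [PySem.Set.contains_iff, mem_pvReach]
  simp [List.any_eq_true, PySem.Set.mem_ofList]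

lemma part1_eq (data : List (Int × List Int)) : part1 data = part1_alt data := by
  unfold part1 part1_alt
  congr 1
  funext answer p
  rcases p with ⟨t, ops⟩
  cases ops with
  | nil => rfl
  | cons x rest => simp only [cond_eq]

-- ===== VERDICT (by name: the statement is the Claim_ definition above) =====
theorem part1_spec : Claim_equal_part1 := by
  intro data _ _
  unfold Spec_part1
  exact part1_eq data
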